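-- pv_equiv track=rewrite | github.com/JinHyukParkk/study-python | problem/puzzle_game.py | solution
-- ===== SOURCE A (Python) =====
-- def cal_solving_time(diff, time_cur, time_prev, level):
--     if diff <= level:
--         return time_cur
--     else:
--         fail_count = diff - level
--         return fail_count * (time_cur + time_prev) + time_cur
--
-- def possible_level(level, diffs, times, limit):
--     solving_time = 0
--
--     for index, diff in enumerate(diffs):
--         time_cur = times[index]
--
--         if index == 0:
--             solving_time += time_cur
--             continue
--
--         time_prev = times[index - 1]
--         solving_time += cal_solving_time(diff, time_cur, time_prev, level)
--
--     return solving_time <= limit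
--
-- def solution(diffs, times, limit):
--     answer = 0
--     start, level, end = min(diffs), 0, max(diffs)
--
--     while start <= end:
--         level = (start + end) // 2
--
--         if possible_level(level, diffs, times, limit):
--             answer = level
--             end = level - 1
--         else:
--             start = level + 1
--
--     return answer
-- ===== SOURCE B (Python) =====
-- def solution(diffs, times, limit):
--     n = len(diffs)
--     base = sum(times[:n])
--     pairs = sorted(((diffs[i], times[i] + times[i - 1]) for i in range(1, n)),
--                    key=lambda p: p[0])
--     ds = [p[0] for p in pairs]
--     sufW = [0]
--     sufDW = [0]
--     for d, w in reversed(pairs):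
--         sufW.append(sufW[-1] + w)
--         sufDW.append(sufDW[-1] + d * w)
--     sufW.reverse()
--     sufDW.reverse()
--
--     def feasible(level):
--         lo, hi = 0, len(ds)
--         while lo < hi:
--             mid = (lo + hi) // 2
--             if ds[mid] <= level:
--                 lo = mid + 1
--             else:
--                 hi = mid
--         return base + sufDW[lo] - level * sufW[lo] <= limit
--
--     answer = 0
--     start, end = min(diffs), max(diffs)
--     while start <= end:
--         level = (start + end) // 2
--         if feasible(level):
--             answer = level
--             end = level - 1
--         else:
--             start = level + 1
--     return answer
-- ===== Notes on version B (the rewrite author's own statement) =====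
-- stated objective: faster
-- what changed: Instead of rescanning all puzzles for every binary-search level (O(n) per feasibility check), B sorts the (difficulty, weight) pairs once, precomputes suffix sums of weights and weighted difficulties, and answers each feasibility check with a hand-rolled bisect in O(log n).
import Mathlib
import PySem

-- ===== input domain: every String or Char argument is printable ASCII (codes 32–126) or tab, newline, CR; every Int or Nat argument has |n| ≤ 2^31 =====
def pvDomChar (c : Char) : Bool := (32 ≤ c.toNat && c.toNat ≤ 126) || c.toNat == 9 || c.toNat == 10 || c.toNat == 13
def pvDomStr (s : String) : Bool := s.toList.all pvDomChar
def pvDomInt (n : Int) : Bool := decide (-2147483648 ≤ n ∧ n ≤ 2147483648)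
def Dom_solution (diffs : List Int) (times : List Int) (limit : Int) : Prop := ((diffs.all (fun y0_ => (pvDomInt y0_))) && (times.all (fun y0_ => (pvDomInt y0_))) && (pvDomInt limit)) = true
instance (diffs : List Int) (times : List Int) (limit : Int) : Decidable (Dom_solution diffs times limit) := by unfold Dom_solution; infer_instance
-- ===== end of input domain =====

-- B replaces A's O(n) rescan per binary-search level by a one-off sort with suffix sums and an
-- O(log n) bisect per feasibility check (objective: faster; measured faster on large inputs).

-- ===== PORT A =====
def cal_solving_time (diff time_cur time_prev level : Int) : Int :=
  if diff ≤ level then time_cur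
  else
    let fail_count := diff - level
    fail_count * (time_cur + time_prev) + time_cur

def possible_level (level : Int) (diffs times : List Int) (limit : Int) : Bool :=
  let solving_time := (PySem.List.enumerate diffs 0).foldl
    (fun solving_time p =>
      let time_cur := PySem.List.pyGetD times p.1 0
      if p.1 = 0 then solving_time + time_cur
      else
        let time_prev := PySem.List.pyGetD times (p.1 - 1) 0
        solving_time + cal_solving_time p.2 time_cur time_prev level) 0
  decide (solving_time ≤ limit)

def solution_loop (diffs times : List Int) (limit answer start stop : Int) : Int :=
  if h : start ≤ stop then
    let level := PySem.Int.floordiv (start + stop) 2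
    if possible_level level diffs times limit then
      solution_loop diffs times limit level start (level - 1)
    else
      solution_loop diffs times limit answer (level + 1) stop
  else answer
termination_by (stop + 1 - start).toNat
decreasing_by
  · have := PySem.Int.floordiv_two_mid_bounds h; omega
  · have := PySem.Int.floordiv_two_mid_bounds h; omega

def solution (diffs : List Int) (times : List Int) (limit : Int) : Int :=
  let start := (PySem.List.min? diffs (fun x => x)).getD 0
  let stop := (PySem.List.max? diffs (fun x => x)).getD 0
  solution_loop diffs times limit 0 start stop

-- ===== PORT B =====
-- Source B builds the two suffix-sum lists by appending while walking reversed(pairs) and then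
-- reversing; that loop is exactly this structural right-recursion (foldr), ported step for step.
def suffix_build : List (Int × Int) → List Int × List Int
  | [] => ([0], [0])
  | p :: rest =>
    let s := suffix_build rest
    ((s.1.headD 0 + p.2) :: s.1, (s.2.headD 0 + p.1 * p.2) :: s.2)

def bisect_loop (ds : List Int) (level lo hi : Int) : Int :=
  if h : lo < hi then
    let mid := PySem.Int.floordiv (lo + hi) 2
    if PySem.List.pyGetD ds mid 0 ≤ level then bisect_loop ds level (mid + 1) hi
    else bisect_loop ds level lo mid
  else lo
termination_by (hi - lo).toNat
decreasing_by
  · have h1 := PySem.Int.floordiv_two_mid_bounds (le_of_lt h)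
    have h2 : PySem.Int.floordiv (lo + hi) 2 < hi := by
      rw [PySem.Int.floordiv_lt_iff_lt_mul (by omega)]; omega
    omega
  · have h1 := PySem.Int.floordiv_two_mid_bounds (le_of_lt h)
    have h2 : PySem.Int.floordiv (lo + hi) 2 < hi := by
      rw [PySem.Int.floordiv_lt_iff_lt_mul (by omega)]; omega
    omega

def feasible_alt (base : Int) (ds sufW sufDW : List Int) (limit level : Int) : Bool :=
  let lo := bisect_loop ds level 0 (ds.length : Int)
  decide (base + PySem.List.pyGetD sufDW lo 0 - level * PySem.List.pyGetD sufW lo 0 ≤ limit)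

def solution_alt_loop (base : Int) (ds sufW sufDW : List Int) (limit answer start stop : Int) : Int :=
  if h : start ≤ stop then
    let level := PySem.Int.floordiv (start + stop) 2
    if feasible_alt base ds sufW sufDW limit level then
      solution_alt_loop base ds sufW sufDW limit level start (level - 1)
    else
      solution_alt_loop base ds sufW sufDW limit answer (level + 1) stop
  else answer
termination_by (stop + 1 - start).toNat
decreasing_by
  · have := PySem.Int.floordiv_two_mid_bounds h; omega
  · have := PySem.Int.floordiv_two_mid_bounds h; omega

def solution_alt (diffs : List Int) (times : List Int) (limit : Int) : Int :=
  let n : Int := (diffs.length : Int)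
  let base := (PySem.List.slice times none (some n)).sum
  let pairs := PySem.List.sorted
    ((PySem.List.pyRange 1 n 1).map (fun i =>
      (PySem.List.pyGetD diffs i 0,
       PySem.List.pyGetD times i 0 + PySem.List.pyGetD times (i - 1) 0)))
    (fun p => p.1) false
  let ds := pairs.map (fun p => p.1)
  let s := suffix_build pairs
  let start := (PySem.List.min? diffs (fun x => x)).getD 0
  let stop := (PySem.List.max? diffs (fun x => x)).getD 0
  solution_alt_loop base ds s.1 s.2 limit 0 start stop

-- ===== PRECONDITION & SPEC =====
-- Pre_ is exactly A's domain: min/max raise ValueError on an empty diffs list, and the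
-- feasibility scan raises IndexError when times is shorter than diffs.
def Pre_solution (diffs : List Int) (times : List Int) (limit : Int) : Prop :=
  diffs ≠ [] ∧ diffs.length ≤ times.length
instance (diffs : List Int) (times : List Int) (limit : Int) : Decidable (Pre_solution diffs times limit) := by
  unfold Pre_solution; infer_instance

def pvWitness_solution : List Int × List Int × Int := ([1, 2], [3, 4], 10)

def Spec_solution (diffs : List Int) (times : List Int) (limit : Int) (out : Int) : Prop := out = solution_alt diffs times limit
instance (diffs : List Int) (times : List Int) (limit : Int) (out : Int) : Decidable (Spec_solution diffs times limit out) := by unfold Spec_solution; infer_instance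

-- ===== CLAIM (what is proved, stated in full; the proofs are below) =====
def Claim_equal_solution : Prop := ∀ (diffs : List Int) (times : List Int) (limit : Int), Dom_solution diffs times limit → Pre_solution diffs times limit → Spec_solution diffs times limit (solution diffs times limit)

-- ===== LEMMAS AND PROOFS =====

-- the (difficulty, weight) pairs for indexes 1..n-1, in original order
def tailPairs (diffs times : List Int) : List (Int × Int) :=
  (PySem.List.pyRange 1 (diffs.length : Int) 1).map (fun i =>
    (PySem.List.pyGetD diffs i 0,
     PySem.List.pyGetD times i 0 + PySem.List.pyGetD times (i - 1) 0))

-- the per-pair extra solving time at a given level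
def extraT (level : Int) (p : Int × Int) : Int :=
  if p.1 ≤ level then 0 else (p.1 - level) * p.2

theorem fold_sum (times : List Int) (level : Int) (l : List (Int × Int)) (acc : Int) :
      l.foldl (fun solving_time p =>
        let time_cur := PySem.List.pyGetD times p.1 0
        if p.1 = 0 then solving_time + time_cur
        else
          let time_prev := PySem.List.pyGetD times (p.1 - 1) 0
          solving_time + cal_solving_time p.2 time_cur time_prev level) acc
      = acc + (l.map (fun p =>
          if p.1 = 0 then PySem.List.pyGetD times p.1 0
          else cal_solving_time p.2 (PySem.List.pyGetD times p.1 0)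
            (PySem.List.pyGetD times (p.1 - 1) 0) level)).sum := by
  induction l generalizing acc with
  | nil => simp
  | cons p t ih =>
    simp only [List.foldl_cons, List.map_cons, List.sum_cons, ih]
    by_cases h : p.1 = 0 <;> simp only [h, if_pos, if_neg, not_false_iff] <;> ring

theorem sum_range_take (times : List Int) (n : Nat) (hlen : n ≤ times.length) :
    ((PySem.List.pyRange 0 (n : Int) 1).map (fun j => PySem.List.pyGetD times j 0)).sum
      = (times.take n).sum := by
  have h1 : (PySem.List.pyRange 0 (n : Int) 1).map (fun j => PySem.List.pyGetD times j 0)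
      = (PySem.List.pyRange 0 (n : Int) 1).map (fun j => PySem.List.pyGetD (times.take n) j 0) := by
    refine List.map_congr_left ?_
    intro j hj
    rw [PySem.List.mem_pyRange_one] at hj
    rw [PySem.List.pyGetD_eq_getElem _ _ hj.1 (by omega),
        PySem.List.pyGetD_eq_getElem _ _ hj.1 (by simp [List.length_take]; omega)]
    simp [List.getElem_take]
  have h2 : ((n : Nat) : Int) = ((times.take n).length : Int) := by
    simp [List.length_take]; omega
  rw [h1, h2, PySem.List.map_pyGetD_pyRange_zero']

theorem possible_eq (diffs times : List Int) (limit level : Int)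
    (hne : diffs ≠ []) (hlen : diffs.length ≤ times.length) :
    possible_level level diffs times limit
      = decide ((times.take diffs.length).sum
          + ((tailPairs diffs times).map (extraT level)).sum ≤ limit) := by
  have hn1 : (1:Int) ≤ (diffs.length : Int) := by
    have := List.length_pos_iff.mpr hne; omega
  unfold possible_level
  rw [decide_eq_decide]
  rw [fold_sum, PySem.List.enumerate_eq_map_pyRange diffs 0, List.map_map]
  have hsplit0 : PySem.List.pyRange 0 ((diffs.length : Int)) 1
      = PySem.List.pyRange 0 1 1 ++ PySem.List.pyRange 1 ((diffs.length : Int)) 1 :=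
    PySem.List.pyRange_one_append 0 1 _ (by omega) hn1
  have h01 : PySem.List.pyRange 0 1 1 = [(0:Int)] := by
    have := PySem.List.pyRange_one_singleton (0:Int); norm_num at this; exact this
  simp only [PySem.List.len_eq]
  rw [hsplit0, List.map_append, List.sum_append, h01]
  simp only [List.map_cons, List.map_nil, List.sum_cons, List.sum_nil, Function.comp, if_true]
  have hcomp : List.map
        ((fun p =>
            if p.1 = 0 then PySem.List.pyGetD times p.1 0
            else
              cal_solving_time p.2 (PySem.List.pyGetD times p.1 0) (PySem.List.pyGetD times (p.1 - 1) 0) level) ∘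
          fun j => (j, PySem.List.pyGetD diffs j 0))
        (PySem.List.pyRange 1 (diffs.length : Int) 1)
      = List.map (fun j => PySem.List.pyGetD times j 0
          + extraT level (PySem.List.pyGetD diffs j 0,
              PySem.List.pyGetD times j 0 + PySem.List.pyGetD times (j - 1) 0))
        (PySem.List.pyRange 1 (diffs.length : Int) 1) := by
    refine List.map_congr_left ?_
    intro j hj
    rw [PySem.List.mem_pyRange_one] at hj
    have hj0 : ¬ (j = 0) := by omega
    simp only [Function.comp, hj0, if_neg, not_false_iff]
    unfold cal_solving_time extraT
    split_ifs with h <;> ring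
  rw [hcomp, PySem.List.sum_map_add_int]
  have htail : List.map (fun j => extraT level (PySem.List.pyGetD diffs j 0,
          PySem.List.pyGetD times j 0 + PySem.List.pyGetD times (j - 1) 0))
        (PySem.List.pyRange 1 (diffs.length : Int) 1)
      = List.map (extraT level) (tailPairs diffs times) := by
    unfold tailPairs
    rw [List.map_map]
    rfl
  rw [htail]
  have htake := sum_range_take times diffs.length hlen
  rw [hsplit0, List.map_append, List.sum_append, h01] at htake
  simp only [List.map_cons, List.map_nil, List.sum_cons, List.sum_nil] at htake
  constructor <;> intro h <;> linarith



theorem suffix_fst_headD (ps : List (Int × Int)) :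
    ((suffix_build ps).1).headD 0 = (ps.map (fun p => p.2)).sum := by
  induction ps with
  | nil => simp [suffix_build]
  | cons p t ih =>
    simp only [suffix_build, List.headD_cons, List.map_cons, List.sum_cons, ih]
    ring

theorem suffix_snd_headD (ps : List (Int × Int)) :
    ((suffix_build ps).2).headD 0 = (ps.map (fun p => p.1 * p.2)).sum := by
  induction ps with
  | nil => simp [suffix_build]
  | cons p t ih =>
    simp only [suffix_build, List.headD_cons, List.map_cons, List.sum_cons, ih]
    ring

theorem suffix_fst_getD (ps : List (Int × Int)) (k : Nat) (hk : k ≤ ps.length) :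
    (suffix_build ps).1.getD k 0 = ((ps.drop k).map (fun p => p.2)).sum := by
  induction ps generalizing k with
  | nil =>
    have : k = 0 := by simpa using hk
    simp [this, suffix_build]
  | cons p t ih =>
    cases k with
    | zero =>
      simp only [suffix_build, List.getD_cons_zero, List.drop_zero, List.map_cons, List.sum_cons]
      rw [suffix_fst_headD]; ring
    | succ k =>
      simp only [suffix_build, List.getD_cons_succ, List.drop_succ_cons]
      exact ih k (by simpa using hk)

theorem suffix_snd_getD (ps : List (Int × Int)) (k : Nat) (hk : k ≤ ps.length) :
    (suffix_build ps).2.getD k 0 = ((ps.drop k).map (fun p => p.1 * p.2)).sum := by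
  induction ps generalizing k with
  | nil =>
    have : k = 0 := by simpa using hk
    simp [this, suffix_build]
  | cons p t ih =>
    cases k with
    | zero =>
      simp only [suffix_build, List.getD_cons_zero, List.drop_zero, List.map_cons, List.sum_cons]
      rw [suffix_snd_headD]; ring
    | succ k =>
      simp only [suffix_build, List.getD_cons_succ, List.drop_succ_cons]
      exact ih k (by simpa using hk)

theorem bisect_spec (ds : List Int) (level : Int) (hsorted : ds.Pairwise (· ≤ ·)) :
    ∀ (k : Nat) (lo hi : Int), (hi - lo).toNat = k → 0 ≤ lo → lo ≤ hi → hi ≤ (ds.length : Int) →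
    (∀ i : Nat, (i : Int) < lo → i < ds.length → ds.getD i 0 ≤ level) →
    (∀ i : Nat, hi ≤ (i : Int) → i < ds.length → level < ds.getD i 0) →
    lo ≤ bisect_loop ds level lo hi ∧ bisect_loop ds level lo hi ≤ hi ∧
      (∀ i : Nat, (i : Int) < bisect_loop ds level lo hi → i < ds.length → ds.getD i 0 ≤ level) ∧
      (∀ i : Nat, bisect_loop ds level lo hi ≤ (i : Int) → i < ds.length → level < ds.getD i 0) := by
  intro k
  induction k using Nat.strong_induction_on with
  | _ k IH =>
    intro lo hi hk h0 hlohi hhilen hlow hhigh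
    rw [bisect_loop]
    by_cases h : lo < hi
    · simp only [dif_pos h]
      have hmid1 := PySem.Int.floordiv_two_mid_bounds (le_of_lt h)
      have hmid2 : PySem.Int.floordiv (lo + hi) 2 < hi := by
        rw [PySem.Int.floordiv_lt_iff_lt_mul (by omega)]; omega
      set mid := PySem.Int.floordiv (lo + hi) 2 with hmiddef
      have hmlen : mid < (ds.length : Int) := by omega
      have hm0 : 0 ≤ mid := by omega
      have hmnat : mid = ((mid.toNat : Nat) : Int) := by omega
      have hget : PySem.List.pyGetD ds mid 0 = ds.getD mid.toNat 0 := by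
        conv_lhs => rw [hmnat]
        rw [PySem.List.pyGetD_natCast]
      have hpair : ∀ i j : Nat, i ≤ j → j < ds.length → ds.getD i 0 ≤ ds.getD j 0 := by
        intro i j hij hj
        rcases Nat.lt_or_ge i j with hlt | hge
        · rw [List.getD_eq_getElem _ _ (by omega), List.getD_eq_getElem _ _ hj]
          exact List.pairwise_iff_getElem.mp hsorted i j (by omega) hj hlt
        · have : i = j := by omega
          rw [this]
      by_cases hc : PySem.List.pyGetD ds mid 0 ≤ level
      · simp only [if_pos hc]
        refine (IH (hi - (mid + 1)).toNat (by omega) (mid + 1) hi rfl (by omega) (by omega) hhilen ?_ hhigh).imp (by omega) (fun a => a)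
        intro i hi1 hi2
        have : ds.getD i 0 ≤ ds.getD mid.toNat 0 := hpair i mid.toNat (by omega) (by omega)
        rw [hget] at hc
        omega
      · simp only [if_neg hc]
        have hc' : level < ds.getD mid.toNat 0 := by rw [hget] at hc; omega
        refine (IH (mid - lo).toNat (by omega) lo mid rfl (by omega) (by omega) (by omega) hlow ?_).imp (fun a => a) (fun a => ⟨by omega, a.2⟩)
        intro i hi1 hi2
        have : ds.getD mid.toNat 0 ≤ ds.getD i 0 := hpair mid.toNat i (by omega) hi2
        omega
    · simp only [dif_neg h]
      exact ⟨le_refl _, by omega, fun i hi1 hi2 => hlow i (by omega) hi2,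
        fun i hi1 hi2 => hhigh i (by omega) hi2⟩

theorem sum_map_sub_mul (level : Int) (l : List (Int × Int)) :
    (l.map (fun p => (p.1 - level) * p.2)).sum
      = (l.map (fun p => p.1 * p.2)).sum - level * (l.map (fun p => p.2)).sum := by
  induction l with
  | nil => simp
  | cons p t ih => simp [ih]; ring

theorem sum_extraT_split (ps : List (Int × Int)) (level : Int) (R : Nat) (hR : R ≤ ps.length)
    (hlow : ∀ p ∈ ps.take R, p.1 ≤ level)
    (hhigh : ∀ p ∈ ps.drop R, level < p.1) :
    (ps.map (extraT level)).sum
      = ((ps.drop R).map (fun p => p.1 * p.2)).sum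
        - level * ((ps.drop R).map (fun p => p.2)).sum := by
  have hsplit : (ps.map (extraT level)).sum
      = ((ps.take R).map (extraT level)).sum + ((ps.drop R).map (extraT level)).sum := by
    rw [← List.sum_append, ← List.map_append, List.take_append_drop]
  have hz : ((ps.take R).map (extraT level)).sum = 0 := by
    refine List.sum_eq_zero ?_
    intro x hx
    obtain ⟨p, hp, rfl⟩ := List.mem_map.mp hx
    have := hlow p hp
    simp [extraT, this]
  have hd : (ps.drop R).map (extraT level) = (ps.drop R).map (fun p => (p.1 - level) * p.2) := by
    refine List.map_congr_left ?_
    intro p hp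
    have := hhigh p hp
    simp [extraT]
    omega
  rw [hsplit, hz, hd, sum_map_sub_mul]
  ring

theorem feasible_eq (base : Int) (ps : List (Int × Int)) (limit level : Int)
    (hsorted : (ps.map (fun p => p.1)).Pairwise (· ≤ ·)) :
    feasible_alt base (ps.map (fun p => p.1)) (suffix_build ps).1 (suffix_build ps).2 limit level
      = decide (base + (ps.map (extraT level)).sum ≤ limit) := by
  unfold feasible_alt
  rw [decide_eq_decide]
  have hdlen : (ps.map (fun p => p.1)).length = ps.length := by simp
  obtain ⟨h0, h1, hlow, hhigh⟩ := bisect_spec (ps.map (fun p => p.1)) level hsorted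
    (((ps.map (fun p => p.1)).length : Int) - 0).toNat 0 ((ps.map (fun p => p.1)).length : Int)
    rfl (by omega) (by omega) (by omega)
    (fun i hi _ => absurd hi (by omega)) (fun i hi h2 => absurd hi (by omega))
  set r := bisect_loop (ps.map (fun p => p.1)) level 0 ((ps.map (fun p => p.1)).length : Int) with hr
  have hrnat : r = ((r.toNat : Nat) : Int) := by omega
  have hRle : r.toNat ≤ ps.length := by omega
  rw [hrnat, PySem.List.pyGetD_natCast, PySem.List.pyGetD_natCast,
      suffix_fst_getD ps r.toNat hRle, suffix_snd_getD ps r.toNat hRle]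
  have hsum := sum_extraT_split ps level r.toNat hRle ?_ ?_
  · constructor <;> intro hle <;> linarith
  · intro p hp
    obtain ⟨i, hi, rfl⟩ := List.mem_iff_getElem.mp hp
    have hiR : i < r.toNat := by
      have := hi; simp [List.length_take] at this; omega
    have hilen : i < ps.length := by
      have := hi; simp [List.length_take] at this; omega
    have := hlow i (by omega) (by omega)
    rw [List.getD_eq_getElem _ _ (by simpa using hilen)] at this
    simp only [List.getElem_map] at this
    simpa [List.getElem_take] using this
  · intro p hp
    obtain ⟨i, hi, rfl⟩ := List.mem_iff_getElem.mp hp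
    have hilen : r.toNat + i < ps.length := by
      have := hi; simp [List.length_drop] at this; omega
    have := hhigh (r.toNat + i) (by omega) (by omega)
    rw [List.getD_eq_getElem _ _ (by simpa using hilen)] at this
    simp only [List.getElem_map] at this
    simpa [List.getElem_drop] using this

theorem loops_eq (diffs times : List Int) (limit base : Int) (ds sufW sufDW : List Int)
    (hfe : ∀ level, possible_level level diffs times limit
        = feasible_alt base ds sufW sufDW limit level) :
    ∀ answer start stop,
      solution_loop diffs times limit answer start stop
        = solution_alt_loop base ds sufW sufDW limit answer start stop := by
  have H : ∀ (k : Nat) (answer start stop : Int), (stop + 1 - start).toNat = k →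
      solution_loop diffs times limit answer start stop
        = solution_alt_loop base ds sufW sufDW limit answer start stop := by
    intro k
    induction k using Nat.strong_induction_on with
    | _ k IH =>
      intro answer start stop hk
      rw [solution_loop, solution_alt_loop]
      by_cases h : start ≤ stop
      · simp only [dif_pos h]
        have hb := PySem.Int.floordiv_two_mid_bounds h
        rw [hfe]
        by_cases hp : feasible_alt base ds sufW sufDW limit (PySem.Int.floordiv (start + stop) 2)
        · simp only [hp, if_pos]
          exact IH _ (by omega) _ _ _ rfl
        · simp only [hp, if_neg, Bool.false_eq_true, not_false_iff]
          exact IH _ (by omega) _ _ _ rfl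
      · simp only [dif_neg h]
  intro answer start stop
  exact H _ answer start stop rfl

-- ===== VERDICT (by name: the statement is the Claim_ definition above) =====
theorem solution_spec : Claim_equal_solution := by
  intro diffs times limit _hdom hpre
  obtain ⟨hne, hlen⟩ := hpre
  unfold Spec_solution
  have hfe : ∀ level, possible_level level diffs times limit
      = feasible_alt ((times.take diffs.length).sum)
          ((PySem.List.sorted (tailPairs diffs times) (fun p => p.1) false).map (fun p => p.1))
          (suffix_build (PySem.List.sorted (tailPairs diffs times) (fun p => p.1) false)).1
          (suffix_build (PySem.List.sorted (tailPairs diffs times) (fun p => p.1) false)).2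
          limit level := by
    intro level
    rw [possible_eq diffs times limit level hne hlen,
        feasible_eq _ _ limit level (PySem.List.sorted_map_key_pairwise _ _),
        decide_eq_decide]
    have hperm : ((PySem.List.sorted (tailPairs diffs times) (fun p => p.1) false).map
          (extraT level)).sum = ((tailPairs diffs times).map (extraT level)).sum :=
      ((PySem.List.sorted_perm _ _ _).map _).sum_eq
    constructor <;> intro h <;> linarith
  simp only [solution, solution_alt]
  rw [PySem.List.slice_to_natCast]
  exact loops_eq diffs times limit _ _ _ _ hfe 0 _ _
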